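-- pv_equiv track=rewrite | github.com/Tomeczeqq/Python | Programowanie dynamiczne/Bit) Programowanie dynamiczne.py | amazon
-- ===== SOURCE A (Python) =====
-- def amazon(A):
--     n=len(A)
--     if n==0:
--         return 0
--     if n==1:
--         return A[0]
--     Wynik=[0 for i in range(n)]
--     Wynik[0]=A[0]
--     for i in range(1,n):
--         for j in range(i,min(i+A[i],n)):
--             Wynik[j]+=Wynik[i-1]
--     return Wynik[n-1]
-- ===== SOURCE B (Python) =====
-- def amazon(A):
--     n = len(A)
--     if n == 0:
--         return 0
--     if n == 1:
--         return A[0]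
--     # difference array over positions: W[j] = diff[0] + ... + diff[j]
--     diff = [0] * (n + 1)
--     diff[0] = A[0]      # initial W[0] = A[0] as a range-add of A[0] on [0, 1)
--     diff[1] = -A[0]
--     cur = 0             # running prefix sum; after 'cur += diff[i-1]' it equals W[i-1]
--     for i in range(1, n):
--         cur += diff[i - 1]
--         if A[i] > 0:
--             diff[i] += cur
--             end = i + A[i]
--             if end < n:
--                 diff[end] -= cur
--     return cur + diff[n - 1]
-- ===== Notes on version B (the rewrite author's own statement) =====
-- stated objective: faster
-- what changed: Replaced A's nested loops (each outer step adds Wynik[i-1] to a whole index range one cell at a time) by a difference array with a running prefix sum, so every range addition is applied in O(1) and one linear pass recovers the result.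
import Mathlib
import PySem

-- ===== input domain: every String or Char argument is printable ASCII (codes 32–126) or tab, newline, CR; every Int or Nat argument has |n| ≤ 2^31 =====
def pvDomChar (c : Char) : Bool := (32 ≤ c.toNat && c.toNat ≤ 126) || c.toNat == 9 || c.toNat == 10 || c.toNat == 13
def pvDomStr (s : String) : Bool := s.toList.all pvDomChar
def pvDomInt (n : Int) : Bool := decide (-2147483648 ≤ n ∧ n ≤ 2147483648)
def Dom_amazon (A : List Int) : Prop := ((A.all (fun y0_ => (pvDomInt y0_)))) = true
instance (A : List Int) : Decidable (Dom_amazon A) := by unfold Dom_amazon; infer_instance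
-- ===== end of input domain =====

-- B replaces A's nested range-add loops (O(n · max A)) by a difference array with a
-- running prefix sum, applying each range addition in O(1) — one O(n) pass.

-- ===== PORT A =====
-- inner loop: for j in range(i, min(i+A[i], n)): Wynik[j] += Wynik[i-1]
def amazonInner (A : List Int) (i : Int) (W : List Int) : List Int :=
  (PySem.List.pyRange i (min (i + PySem.List.pyGetD A i 0) (A.length : Int)) 1).foldl
    (fun Wc j => PySem.List.pySetD Wc j (PySem.List.pyGetD Wc j 0 + PySem.List.pyGetD Wc (i-1) 0)) W

def amazon (A : List Int) : Int :=
  if (A.length : Int) = 0 then 0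
  else if (A.length : Int) = 1 then PySem.List.pyGetD A 0 0
  else
    -- Wynik = [0]*n; Wynik[0] = A[0]
    let W1 := PySem.List.pySetD ((PySem.List.pyRange 0 (A.length : Int) 1).map (fun _ => (0:Int)))
                0 (PySem.List.pyGetD A 0 0)
    let W2 := (PySem.List.pyRange 1 (A.length : Int) 1).foldl (fun Wc i => amazonInner A i Wc) W1
    PySem.List.pyGetD W2 ((A.length : Int) - 1) 0

-- ===== PORT B =====
-- one loop iteration of Source B: cur += diff[i-1]; if A[i] > 0: diff[i] += cur; if i+A[i] < n: diff[i+A[i]] -= cur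
def amazonAltStep (A : List Int) (s : List Int × Int) (i : Int) : List Int × Int :=
  let c := s.2 + PySem.List.pyGetD s.1 (i-1) 0
  if 0 < PySem.List.pyGetD A i 0 then
    let d1 := PySem.List.pySetD s.1 i (PySem.List.pyGetD s.1 i 0 + c)
    let e := i + PySem.List.pyGetD A i 0
    let d2 := if e < (A.length : Int) then PySem.List.pySetD d1 e (PySem.List.pyGetD d1 e 0 - c) else d1
    (d2, c)
  else (s.1, c)

def amazon_alt (A : List Int) : Int :=
  if (A.length : Int) = 0 then 0
  else if (A.length : Int) = 1 then PySem.List.pyGetD A 0 0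
  else
    -- diff = [0]*(n+1); diff[0] = A[0]; diff[1] = -A[0]; cur = 0
    let d0 := PySem.List.pySetD
                (PySem.List.pySetD ((PySem.List.pyRange 0 ((A.length : Int)+1) 1).map (fun _ => (0:Int)))
                  0 (PySem.List.pyGetD A 0 0))
                1 (-(PySem.List.pyGetD A 0 0))
    let s := (PySem.List.pyRange 1 (A.length : Int) 1).foldl (amazonAltStep A) (d0, 0)
    s.2 + PySem.List.pyGetD s.1 ((A.length : Int) - 1) 0

-- ===== PRECONDITION & SPEC =====
def Spec_amazon (A : List Int) (out : Int) : Prop := out = amazon_alt A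
instance (A : List Int) (out : Int) : Decidable (Spec_amazon A out) := by unfold Spec_amazon; infer_instance

-- ===== CLAIM (what is proved, stated in full; the proofs are below) =====
def Claim_equal_amazon : Prop := ∀ (A : List Int), Dom_amazon A → Spec_amazon A (amazon A)

-- ===== LEMMAS AND PROOFS =====

-- loop invariant: after processing outer indices 1..k, A's array W is everywhere the
-- prefix sum of B's difference array d, and B's running sum c is the prefix below k
def InvAm (A : List Int) (k : Nat) (W d : List Int) (c : Int) : Prop :=
  W.length = A.length ∧ d.length = A.length + 1 ∧
  (∀ j : Nat, j < A.length → W.getD j 0 = (d.take (j+1)).sum) ∧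
  c = (d.take k).sum

lemma getD_set (l : List Int) (m : Nat) (v : Int) (j : Nat) :
    (l.set m v).getD j 0 = if j = m ∧ m < l.length then v else l.getD j 0 := by
  simp [List.getD, List.getElem?_set]
  split_ifs with h1 h2 <;> simp_all

lemma sum_take_succ (l : List Int) (k : Nat) (h : k < l.length) :
    (l.take (k+1)).sum = (l.take k).sum + l.getD k 0 := by
  rw [List.take_succ_eq_append_getElem h, List.sum_append]
  simp only [List.sum_cons, List.sum_nil]
  rw [List.getD_eq_getElem l 0 h]
  ring

lemma sum_set (l : List Int) (m : Nat) (v : Int) (h : m < l.length) :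
    (l.set m v).sum = l.sum + v - l.getD m 0 := by
  induction l generalizing m with
  | nil => simp at h
  | cons x xs ih =>
    cases m with
    | zero => simp [List.getD]; ring
    | succ m =>
      simp only [List.set, List.sum_cons]
      rw [ih m (by simpa using h)]
      simp [List.getD]; ring

lemma sum_take_set (l : List Int) (m : Nat) (v : Int) (t : Nat) (h : m < l.length) :
    ((l.set m v).take t).sum = (l.take t).sum + (if m < t then v - l.getD m 0 else 0) := by
  rw [List.take_set]
  by_cases hmt : m < t
  · have hm' : m < (l.take t).length := by simp [List.length_take]; omega
    rw [sum_set _ _ _ hm']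
    have : (l.take t).getD m 0 = l.getD m 0 := by
      simp [List.getD, hmt]
    rw [this]; simp [hmt]; ring
  · rw [List.set_eq_of_length_le (by simp [List.length_take]; omega)]
    simp [hmt]

-- effect of A's inner loop: adds W[p] to every W[j], a ≤ j < b (p below the range, b within bounds)
lemma inner_fold_spec (p : Nat) : ∀ (t : Nat) (a : Nat) (b : Int) (W : List Int),
    p < a → b ≤ (W.length : Int) → (b - (a : Int)).toNat = t →
    (((PySem.List.pyRange (a : Int) b 1).foldl
        (fun Wc j => PySem.List.pySetD Wc j (PySem.List.pyGetD Wc j 0 + PySem.List.pyGetD Wc (p : Int) 0)) W).length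
      = W.length) ∧
    (∀ m : Nat, ((PySem.List.pyRange (a : Int) b 1).foldl
        (fun Wc j => PySem.List.pySetD Wc j (PySem.List.pyGetD Wc j 0 + PySem.List.pyGetD Wc (p : Int) 0)) W).getD m 0
      = W.getD m 0 + (if (a : Int) ≤ (m : Int) ∧ (m : Int) < b then W.getD p 0 else 0)) := by
  intro t
  induction t with
  | zero =>
    intro a b W hpa hbW ht
    rw [PySem.List.pyRange_one_eq_nil (by omega)]
    refine ⟨rfl, fun m => ?_⟩
    have h : ¬((a:Int) ≤ (m:Int) ∧ (m:Int) < b) := by omega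
    rw [if_neg h]; simp
  | succ t ih =>
    intro a b W hpa hbW ht
    have hab : (a:Int) < b := by omega
    have haW : a < W.length := by omega
    rw [PySem.List.pyRange_one_cons hab]
    simp only [List.foldl_cons]
    have hcast : (a:Int) + 1 = ((a+1 : Nat) : Int) := by push_cast; ring
    rw [show PySem.List.pySetD W (a:Int) (PySem.List.pyGetD W (a:Int) 0 + PySem.List.pyGetD W (p:Int) 0)
          = W.set a (W.getD a 0 + W.getD p 0) from by simp, hcast]
    obtain ⟨hlen, hget⟩ := ih (a+1) b (W.set a (W.getD a 0 + W.getD p 0))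
      (by omega) (by simpa using hbW) (by omega)
    refine ⟨by simpa using hlen, fun m => ?_⟩
    rw [hget m]
    rw [getD_set, getD_set]
    have hpA : ¬(p = a ∧ a < W.length) := fun h => absurd h.1 hpa.ne
    rw [if_neg hpA]
    by_cases hm : m = a
    · have h1 : ¬(((a+1:Nat):Int) ≤ (m:Int) ∧ (m:Int) < b) := by push_cast; omega
      have h2 : (a:Int) ≤ (m:Int) ∧ (m:Int) < b := by omega
      rw [if_pos ⟨hm, haW⟩, if_neg h1, if_pos h2, hm]
      ring
    · have hcond : (((a+1:Nat):Int) ≤ (m:Int) ∧ (m:Int) < b) ↔ ((a:Int) ≤ (m:Int) ∧ (m:Int) < b) := by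
        push_cast; omega
      rw [if_neg (fun h => hm h.1), if_congr hcond rfl rfl]

-- one outer iteration i = k+1 preserves the invariant
lemma step_inv (A : List Int) (k : Nat) (W d : List Int) (c : Int)
    (hk : k + 1 < A.length) (hinv : InvAm A k W d c) :
    InvAm A (k+1) (amazonInner A ((k:Int)+1) W)
      (amazonAltStep A (d, c) ((k:Int)+1)).1 (amazonAltStep A (d, c) ((k:Int)+1)).2 := by
  obtain ⟨hWl, hdl, hpt, hc⟩ := hinv
  have hkd : k < d.length := by omega
  have hcast1 : ((k:Int) + 1 - 1) = ((k:Nat):Int) := by ring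
  have hcast2 : ((k:Int) + 1) = ((k+1:Nat):Int) := by push_cast; ring
  -- the value added by this iteration
  set ai := A.getD (k+1) 0 with hai
  set b : Int := min (((k+1:Nat):Int) + ai) (A.length : Int) with hb
  -- A's side: the inner loop
  have hInner : amazonInner A ((k:Int)+1) W =
      (PySem.List.pyRange ((k+1:Nat):Int) b 1).foldl
        (fun Wc j => PySem.List.pySetD Wc j (PySem.List.pyGetD Wc j 0 + PySem.List.pyGetD Wc ((k:Nat):Int) 0)) W := by
    unfold amazonInner
    rw [hcast2]
    simp only [show (((k+1:Nat):Int) - 1) = ((k:Nat):Int) from by push_cast; ring]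
    rw [show PySem.List.pyGetD A ((k+1:Nat):Int) 0 = ai from by rw [PySem.List.pyGetD_natCast]]
  obtain ⟨hL, hG⟩ := inner_fold_spec k ((b - ((k+1:Nat):Int)).toNat) (k+1) b W
    (by omega) (by simp [hb, hWl]) rfl
  rw [hInner]
  -- B's side: the step
  have hcEq : c + PySem.List.pyGetD d ((k:Int)+1-1) 0 = (d.take (k+1)).sum := by
    rw [hcast1, PySem.List.pyGetD_natCast, hc, sum_take_succ d k hkd]
  have hcW : c + PySem.List.pyGetD d ((k:Int)+1-1) 0 = W.getD k 0 := by
    rw [hcEq, hpt k (by omega)]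
  set c' := c + PySem.List.pyGetD d ((k:Int)+1-1) 0 with hc'
  unfold amazonAltStep
  simp only
  by_cases hpos : 0 < PySem.List.pyGetD A ((k:Int)+1) 0
  · rw [if_pos hpos]
    have haiP : 0 < ai := by rwa [hcast2, PySem.List.pyGetD_natCast] at hpos
    -- d1 and d2 as Nat-index sets
    have hd1 : PySem.List.pySetD d ((k:Int)+1) (PySem.List.pyGetD d ((k:Int)+1) 0 + c')
        = d.set (k+1) (d.getD (k+1) 0 + c') := by
      rw [hcast2, PySem.List.pyGetD_natCast, PySem.List.pySetD_natCast]
    rw [hd1]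
    set d1 := d.set (k+1) (d.getD (k+1) 0 + c') with hd1'
    have hd1l : d1.length = A.length + 1 := by simp [hd1', hdl]
    set e : Int := (k:Int) + 1 + PySem.List.pyGetD A ((k:Int)+1) 0 with he
    have heai : e = ((k+1:Nat):Int) + ai := by
      rw [he, hcast2, PySem.List.pyGetD_natCast]
    by_cases hlt : e < (A.length : Int)
    · rw [if_pos hlt]
      have he0 : 0 ≤ e := by omega
      have hetn : e.toNat < d1.length := by omega
      have hd2 : PySem.List.pySetD d1 e (PySem.List.pyGetD d1 e 0 - c')
          = d1.set e.toNat (d1.getD e.toNat 0 - c') := by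
        have heN : e = ((e.toNat : Nat) : Int) := by omega
        rw [heN, PySem.List.pySetD_natCast, PySem.List.pyGetD_natCast]
        simp only [Int.toNat_natCast]
      rw [hd2]
      refine ⟨by rw [hL, hWl], by simp [hd1l], fun j hj => ?_, ?_⟩
      · rw [hG j, hpt j hj, hpt k (by omega)]
        rw [sum_take_set _ _ _ _ hetn, sum_take_set _ _ _ _ (by omega)]
        rw [show d.getD (k+1) 0 + c' - d.getD (k+1) 0 = c' from by ring]
        rw [show d1.getD e.toNat 0 - c' - d1.getD e.toNat 0 = -c' from by ring]
        rw [← hcEq]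
        split_ifs <;> push_cast at * <;> omega
      · show c' = _
        rw [sum_take_set _ _ _ _ hetn, sum_take_set _ _ _ _ (by omega)]
        rw [if_neg (by omega), if_neg (by omega)]
        rw [hcEq]; ring
    · rw [if_neg hlt]
      refine ⟨by rw [hL, hWl], by simp [hd1l], fun j hj => ?_, ?_⟩
      · rw [hG j, hpt j hj, hpt k (by omega)]
        rw [sum_take_set _ _ _ _ (by omega : k+1 < d.length)]
        rw [show d.getD (k+1) 0 + c' - d.getD (k+1) 0 = c' from by ring]
        rw [← hcEq]
        split_ifs <;> push_cast at * <;> omega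
      · show c' = _
        rw [sum_take_set _ _ _ _ (by omega : k+1 < d.length)]
        rw [if_neg (by omega)]
        exact hcEq.trans (by ring)
  · rw [if_neg hpos]
    have haiN : ¬ 0 < ai := by rwa [hcast2, PySem.List.pyGetD_natCast] at hpos
    refine ⟨by rw [hL, hWl], hdl, fun j hj => ?_, hcEq⟩
    rw [hG j, hpt j hj]
    rw [if_neg (by push_cast at *; omega)]
    ring

-- the whole loop: folding i = k+1 .. n-1 carries the invariant to n-1
lemma fold_inv (A : List Int) : ∀ (t k : Nat) (W d : List Int) (c : Int),
    k + t + 1 = A.length → InvAm A k W d c →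
    InvAm A (A.length - 1)
      ((PySem.List.pyRange ((k:Int)+1) (A.length : Int) 1).foldl (fun Wc i => amazonInner A i Wc) W)
      ((PySem.List.pyRange ((k:Int)+1) (A.length : Int) 1).foldl (amazonAltStep A) (d, c)).1
      ((PySem.List.pyRange ((k:Int)+1) (A.length : Int) 1).foldl (amazonAltStep A) (d, c)).2 := by
  intro t
  induction t with
  | zero =>
    intro k W d c hn hinv
    rw [PySem.List.pyRange_one_eq_nil (by omega)]
    simpa using (by omega : k = A.length - 1) ▸ hinv
  | succ t ih =>
    intro k W d c hn hinv
    rw [PySem.List.pyRange_one_cons (by exact_mod_cast by omega)]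
    simp only [List.foldl_cons]
    have h := step_inv A k W d c (by omega) hinv
    have := ih (k+1) _ _ _ (by omega) h
    push_cast at this ⊢
    convert this using 3

-- the initial state satisfies the invariant
lemma init_inv (A : List Int) (h : 2 ≤ A.length) :
    InvAm A 0
      (PySem.List.pySetD ((PySem.List.pyRange 0 (A.length : Int) 1).map (fun _ => (0:Int))) 0 (PySem.List.pyGetD A 0 0))
      (PySem.List.pySetD
        (PySem.List.pySetD ((PySem.List.pyRange 0 ((A.length : Int)+1) 1).map (fun _ => (0:Int))) 0 (PySem.List.pyGetD A 0 0))
        1 (-(PySem.List.pyGetD A 0 0))) 0 := by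
  set a0 := PySem.List.pyGetD A 0 0 with ha0
  set z1 := (PySem.List.pyRange 0 (A.length : Int) 1).map (fun _ => (0:Int)) with hz1
  set z2 := (PySem.List.pyRange 0 ((A.length : Int)+1) 1).map (fun _ => (0:Int)) with hz2
  have hz1l : z1.length = A.length := by simp [hz1, PySem.List.length_pyRange_one]
  have hz2l : z2.length = A.length + 1 := by
    simp [hz2, PySem.List.length_pyRange_one]
  have hmem1 : ∀ x ∈ z1, x = 0 := by intro x hx; rw [hz1] at hx; simp at hx; tauto
  have hmem2 : ∀ x ∈ z2, x = 0 := by intro x hx; rw [hz2] at hx; simp at hx; tauto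
  have hget : ∀ (l : List Int), (∀ x ∈ l, x = 0) → ∀ j : Nat, l.getD j 0 = 0 := by
    intro l hm j
    rcases hh : l[j]? with _ | x
    · simp [List.getD, hh]
    · simp [List.getD, hh, hm x (List.mem_of_getElem? hh)]
  have htake2 : ∀ t, (z2.take t).sum = 0 :=
    fun t => List.sum_eq_zero (fun x hx => hmem2 x (List.mem_of_mem_take hx))
  have hs0 : PySem.List.pySetD z2 0 a0 = z2.set 0 a0 := by
    rw [show (0:Int) = ((0:Nat):Int) from rfl, PySem.List.pySetD_natCast]
  have hs1 : PySem.List.pySetD (z2.set 0 a0) 1 (-a0) = (z2.set 0 a0).set 1 (-a0) := by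
    rw [show (1:Int) = ((1:Nat):Int) from rfl, PySem.List.pySetD_natCast]
  have hsw : PySem.List.pySetD z1 0 a0 = z1.set 0 a0 := by
    rw [show (0:Int) = ((0:Nat):Int) from rfl, PySem.List.pySetD_natCast]
  rw [hs0, hs1, hsw]
  refine ⟨by simp [hz1l], by simp [hz2l], fun j hj => ?_, by simp⟩
  rw [sum_take_set (z2.set 0 a0) 1 (-a0) (j+1) (by simp [hz2l]; omega),
      sum_take_set z2 0 a0 (j+1) (by omega)]
  rw [htake2]
  rw [show (z2.set 0 a0).getD 1 0 = z2.getD 1 0 from by rw [getD_set]; simp]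
  rw [hget z2 hmem2 0, hget z2 hmem2 1, getD_set, hget z1 hmem1 j]
  split_ifs <;> first | ring1 | (exfalso; omega)

-- ===== VERDICT (by name: the statement is the Claim_ definition above) =====
theorem amazon_spec : Claim_equal_amazon := by
  intro A _
  show amazon A = amazon_alt A
  unfold amazon amazon_alt
  by_cases h0 : (A.length : Int) = 0
  · rw [if_pos h0, if_pos h0]
  by_cases h1 : (A.length : Int) = 1
  · rw [if_neg h0, if_neg h0, if_pos h1, if_pos h1]
  rw [if_neg h0, if_neg h0, if_neg h1, if_neg h1]
  simp only
  have h2 : 2 ≤ A.length := by omega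
  have hfold := fold_inv A (A.length - 1) 0 _ _ 0 (by omega) (init_inv A h2)
  rw [show ((0:Nat):Int) + 1 = 1 from by norm_num] at hfold
  obtain ⟨hWl, hdl, hpt, hc⟩ := hfold
  have hcastn : (A.length : Int) - 1 = ((A.length - 1 : Nat) : Int) := by omega
  rw [hcastn, PySem.List.pyGetD_natCast, PySem.List.pyGetD_natCast]
  rw [hpt (A.length - 1) (by omega), hc]
  rw [← sum_take_succ _ (A.length - 1) (by omega)]
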